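-- pv_equiv track=rewrite | github.com/jw409/modelforecast | games/corewars/ai/generate_warrior.py | _extract_redcode
-- ===== SOURCE A (Python) =====
-- def _extract_redcode(response: str) -> str:
--     """Extract Redcode from LLM response (may be wrapped in markdown)"""
--     # Look for code blocks
--     if "```" in response:
--         # Extract code from markdown block
--         parts = response.split("```")
--         for i, part in enumerate(parts):
--             if i % 2 == 1:  # Inside code block
--                 # Remove language identifier if present
--                 lines = part.strip().split('\n')
--                 if lines[0].strip().lower() in ['redcode', 'assembly', 'asm', '']:
--                     return '\n'.join(lines[1:] if lines[0].strip() else lines)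
--                 return part.strip()
--
--     # No code blocks, return as-is (filter out obvious non-code)
--     lines = response.split('\n')
--     code_lines = []
--     for line in lines:
--         stripped = line.strip()
--         # Skip obvious markdown/prose
--         if stripped.startswith('#') and not stripped.startswith('#'):
--             continue
--         if stripped.startswith('**'):
--             continue
--         code_lines.append(line)
--
--     return '\n'.join(code_lines)
-- ===== SOURCE B (Python) =====
-- def _extract_redcode(response: str) -> str:
--     """Extract Redcode from LLM response (may be wrapped in markdown)"""
--     n = len(response)
--     # single left-to-right character scan: state machine counting a run of backticks
--     i, run = 0, 0
--     while i < n and run < 3:                 # look for the opening fence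
--         run = run + 1 if response[i] == '`' else 0
--         i += 1
--     if run == 3:
--         buf = []                             # collect the block char by char
--         run = 0
--         while i < n and run < 3:             # until the closing fence (or the end)
--             c = response[i]
--             run = run + 1 if c == '`' else 0
--             buf.append(c)
--             i += 1
--         body = ''.join(buf[:-3] if run == 3 else buf).strip()
--         lines = body.split('\n')
--         if lines[0].strip().lower() in ('redcode', 'assembly', 'asm'):
--             return '\n'.join(lines[1:])
--         return body
--     # no fence anywhere: keep every line not starting (stripped) with '**'
--     kept = [l for l in response.split('\n') if not l.strip().startswith('**')]
--     return '\n'.join(kept)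
-- ===== Notes on version B (the rewrite author's own statement) =====
-- stated objective: alternative
-- what changed: Replaces A's split-the-whole-string-on-the-fence-marker plus enumerate/parity loop over the parts list by a single left-to-right character scan: a finite-state machine counting a run of backticks locates the opening fence and then collects the block char by char until the closing run, and A's fallback accumulator loop (with its dead '#' branch) becomes a one-line filter.
import Mathlib
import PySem

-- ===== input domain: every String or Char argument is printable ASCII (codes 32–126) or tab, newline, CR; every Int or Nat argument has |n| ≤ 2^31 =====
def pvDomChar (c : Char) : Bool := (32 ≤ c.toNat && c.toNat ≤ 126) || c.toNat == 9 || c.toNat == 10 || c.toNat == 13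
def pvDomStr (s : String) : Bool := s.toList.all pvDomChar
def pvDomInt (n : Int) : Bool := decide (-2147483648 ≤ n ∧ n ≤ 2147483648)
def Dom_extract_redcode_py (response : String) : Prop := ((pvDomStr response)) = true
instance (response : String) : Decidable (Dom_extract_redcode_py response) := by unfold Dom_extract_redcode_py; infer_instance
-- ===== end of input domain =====

-- B replaces A's split-on-the-fence-marker + enumerate/parity loop over the parts by a single
-- character-by-character scan with a backtick-run-counting state machine (objective: alternative).

-- ===== PORT A =====
-- the fallback tail of A: filter out lines whose stripped form starts with '**'
-- (the '#' branch is ported literally; its condition is `x and not x`)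
def pvAFallback (s : List Char) : List Char :=
  let lines := PySem.Chars.splitOn s ['\n']
  let code_lines := lines.foldl (fun acc line =>
    let stripped := PySem.Chars.strip line
    if PySem.Chars.startswith stripped ['#'] && !(PySem.Chars.startswith stripped ['#']) then acc
    else if PySem.Chars.startswith stripped ['*','*'] then acc
    else acc ++ [line]) []
  PySem.Chars.join ['\n'] code_lines

-- "for i, part in enumerate(parts): if i % 2 == 1: return …" (early return as Option)
def pvALoop : List (List Char) → Nat → Option (List Char)
  | [], _ => none
  | part :: rest, i =>
    if i % 2 == 1 then
      let lines := PySem.Chars.splitOn (PySem.Chars.strip part) ['\n']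
      let l0 := lines.headD []        -- lines[0]; splitOn never returns []
      if PySem.Chars.lower (PySem.Chars.strip l0)
          ∈ [['r','e','d','c','o','d','e'], ['a','s','s','e','m','b','l','y'], ['a','s','m'], []] then
        some (PySem.Chars.join ['\n'] (if PySem.Chars.strip l0 ≠ [] then lines.drop 1 else lines))
      else
        some (PySem.Chars.strip part)
    else pvALoop rest (i + 1)

def extract_redcode_py (response : String) : String :=
  let s := response.toList
  let res :=
    if PySem.Chars.isIn ['`','`','`'] s then
      match pvALoop (PySem.Chars.splitOn s ['`','`','`']) 0 with
      | some r => r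
      | none => pvAFallback s
    else pvAFallback s
  String.ofList res

-- ===== PORT B =====
-- "while i < n and run < 3: run = run + 1 if response[i] == '`' else 0; i += 1"
-- returns (the unread remainder response[i:], the final run counter)
def pvBScan : List Char → Nat → (List Char × Nat)
  | [], run => ([], run)
  | c :: t, run => if run < 3 then pvBScan t (if c = '`' then run + 1 else 0) else (c :: t, run)

-- the second while loop: same scan, additionally appending each read char to buf
def pvBScan2 : List Char → Nat → List Char → (List Char × Nat)
  | [], run, buf => (buf, run)
  | c :: t, run, buf =>
    if run < 3 then pvBScan2 t (if c = '`' then run + 1 else 0) (buf ++ [c]) else (buf, run)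

def extract_redcode_py_alt (response : String) : String :=
  let s := response.toList
  let scan := pvBScan s 0                       -- (remainder after the opening fence, run)
  if scan.2 == 3 then
    let scan2 := pvBScan2 scan.1 0 []           -- (buf, run)
    -- buf[:-3] = take (length - 3) (Nat subtraction truncates exactly like the Python slice)
    let body := PySem.Chars.strip (if scan2.2 == 3 then scan2.1.take (scan2.1.length - 3) else scan2.1)
    let lines := PySem.Chars.splitOn body ['\n']
    if PySem.Chars.lower (PySem.Chars.strip (lines.headD []))   -- lines[0]; splitOn never returns []
        ∈ [['r','e','d','c','o','d','e'], ['a','s','s','e','m','b','l','y'], ['a','s','m']] then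
      String.ofList (PySem.Chars.join ['\n'] (lines.drop 1))
    else String.ofList body
  else
    String.ofList (PySem.Chars.join ['\n']
      ((PySem.Chars.splitOn s ['\n']).filter
        (fun l => !PySem.Chars.startswith (PySem.Chars.strip l) ['*','*'])))

-- ===== PRECONDITION & SPEC =====
def Spec_extract_redcode_py (response : String) (out : String) : Prop := out = extract_redcode_py_alt response
instance (response : String) (out : String) : Decidable (Spec_extract_redcode_py response out) := by unfold Spec_extract_redcode_py; infer_instance

-- ===== CLAIM (what is proved, stated in full; the proofs are below) =====
def Claim_equal_extract_redcode_py : Prop := ∀ (response : String), Dom_extract_redcode_py response → Spec_extract_redcode_py response (extract_redcode_py response)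

-- ===== LEMMAS AND PROOFS =====

-- find: shifting the running index
lemma pv_findgo_shift (sub l : List Char) : ∀ (k : Nat),
    PySem.Chars.find.go sub l k =
      if PySem.Chars.find l sub = -1 then -1 else PySem.Chars.find l sub + k := by
  induction l with
  | nil =>
    intro k
    rw [PySem.Chars.find]
    rw [show PySem.Chars.find.go sub [] k = (if sub.isEmpty then (k:Int) else -1) from rfl]
    rw [show PySem.Chars.find.go sub [] 0 = (if sub.isEmpty then (0:Int) else -1) from rfl]
    by_cases h : sub.isEmpty <;> simp [h]
  | cons c t ih =>
    intro k
    rw [PySem.Chars.find]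
    rw [show PySem.Chars.find.go sub (c :: t) k =
      (if sub.isPrefixOf (c :: t) then (k : Int) else PySem.Chars.find.go sub t (k+1)) from rfl]
    rw [show PySem.Chars.find.go sub (c :: t) 0 =
      (if sub.isPrefixOf (c :: t) then (0 : Int) else PySem.Chars.find.go sub t 1) from rfl]
    by_cases hp : sub.isPrefixOf (c :: t)
    · simp [hp]
    · simp only [hp]
      rw [ih (k+1), ih 1]
      have hnn : (-1 : Int) ≤ PySem.Chars.find t sub := PySem.Chars.neg_one_le_find t sub
      by_cases h0 : PySem.Chars.find t sub = -1
      · simp [h0]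
      · have : PySem.Chars.find t sub + 1 ≠ -1 := by omega
        simp [h0, this]; omega

lemma pv_find_cons (sub : List Char) (c : Char) (t : List Char) :
    PySem.Chars.find (c :: t) sub =
      if sub.isPrefixOf (c :: t) then 0
      else if PySem.Chars.find t sub = -1 then -1 else PySem.Chars.find t sub + 1 := by
  rw [PySem.Chars.find]
  rw [show PySem.Chars.find.go sub (c :: t) 0 =
    (if sub.isPrefixOf (c :: t) then (0 : Int) else PySem.Chars.find.go sub t 1) from rfl]
  by_cases hp : sub.isPrefixOf (c :: t)
  · simp [hp]
  · simp only [hp]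
    rw [pv_findgo_shift]
    push_cast
    rfl

lemma pv_find_nil (sub : List Char) (h : sub ≠ []) : PySem.Chars.find [] sub = -1 := by
  rw [PySem.Chars.find]
  rw [show PySem.Chars.find.go sub [] 0 = (if sub.isEmpty then (0:Int) else -1) from rfl]
  simp [h]

lemma pv_go_ne_nil (sep : List Char) : ∀ (fuel : Nat) (l cur : List Char) (acc : List (List Char)),
    PySem.Chars.splitOn.go sep fuel l cur acc ≠ [] := by
  intro fuel
  induction fuel with
  | zero => intro l cur acc; rw [show PySem.Chars.splitOn.go sep 0 l cur acc = ((cur.reverse ++ l) :: acc).reverse from rfl]; simp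
  | succ f ih =>
    intro l cur acc
    cases l with
    | nil => rw [show PySem.Chars.splitOn.go sep (f+1) [] cur acc = (cur.reverse :: acc).reverse from rfl]; simp
    | cons c rest =>
      rw [show PySem.Chars.splitOn.go sep (f+1) (c :: rest) cur acc =
        (if sep.isPrefixOf (c :: rest) then PySem.Chars.splitOn.go sep f (List.drop sep.length (c :: rest)) [] (cur.reverse :: acc)
         else PySem.Chars.splitOn.go sep f rest (c :: cur) acc) from rfl]
      by_cases hp : sep.isPrefixOf (c :: rest) <;> simp [hp, ih]

-- splitOn.go: accumulators factor out; fuel is irrelevant once sufficient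
lemma pv_go_acc (sep : List Char) : ∀ (fuel : Nat) (l cur : List Char) (acc : List (List Char)),
    PySem.Chars.splitOn.go sep fuel l cur acc =
      acc.reverse ++ PySem.Chars.splitOn.go sep fuel l cur [] := by
  intro fuel
  induction fuel with
  | zero =>
    intro l cur acc
    rw [show PySem.Chars.splitOn.go sep 0 l cur acc = ((cur.reverse ++ l) :: acc).reverse from rfl,
        show PySem.Chars.splitOn.go sep 0 l cur [] = ((cur.reverse ++ l) :: ([]:List (List Char))).reverse from rfl]
    simp
  | succ f ih =>
    intro l cur acc
    cases l with
    | nil =>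
      rw [show PySem.Chars.splitOn.go sep (f+1) [] cur acc = (cur.reverse :: acc).reverse from rfl,
          show PySem.Chars.splitOn.go sep (f+1) [] cur [] = (cur.reverse :: ([]:List (List Char))).reverse from rfl]
      simp
    | cons c rest =>
      rw [show PySem.Chars.splitOn.go sep (f+1) (c :: rest) cur acc =
        (if sep.isPrefixOf (c :: rest) then PySem.Chars.splitOn.go sep f (List.drop sep.length (c :: rest)) [] (cur.reverse :: acc)
         else PySem.Chars.splitOn.go sep f rest (c :: cur) acc) from rfl,
        show PySem.Chars.splitOn.go sep (f+1) (c :: rest) cur [] =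
        (if sep.isPrefixOf (c :: rest) then PySem.Chars.splitOn.go sep f (List.drop sep.length (c :: rest)) [] [cur.reverse]
         else PySem.Chars.splitOn.go sep f rest (c :: cur) []) from rfl]
      by_cases hp : sep.isPrefixOf (c :: rest)
      · simp only [hp, if_true]
        rw [ih _ _ (cur.reverse :: acc), ih _ _ [cur.reverse]]
        simp
      · simp only [hp]
        exact ih _ _ acc

lemma pv_go_cur (sep : List Char) : ∀ (fuel : Nat) (l cur : List Char),
    PySem.Chars.splitOn.go sep fuel l cur [] =
      (PySem.Chars.splitOn.go sep fuel l [] []).modifyHead (cur.reverse ++ ·) := by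
  intro fuel
  induction fuel with
  | zero =>
    intro l cur
    rw [show PySem.Chars.splitOn.go sep 0 l cur [] = ((cur.reverse ++ l) :: ([]:List (List Char))).reverse from rfl,
        show PySem.Chars.splitOn.go sep 0 l [] [] = ((([]:List Char).reverse ++ l) :: ([]:List (List Char))).reverse from rfl]
    simp
  | succ f ih =>
    intro l cur
    cases l with
    | nil =>
      rw [show PySem.Chars.splitOn.go sep (f+1) [] cur [] = (cur.reverse :: ([]:List (List Char))).reverse from rfl,
          show PySem.Chars.splitOn.go sep (f+1) [] ([]:List Char) [] = (([]:List Char).reverse :: ([]:List (List Char))).reverse from rfl]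
      simp
    | cons c rest =>
      rw [show PySem.Chars.splitOn.go sep (f+1) (c :: rest) cur [] =
        (if sep.isPrefixOf (c :: rest) then PySem.Chars.splitOn.go sep f (List.drop sep.length (c :: rest)) [] [cur.reverse]
         else PySem.Chars.splitOn.go sep f rest (c :: cur) []) from rfl,
        show PySem.Chars.splitOn.go sep (f+1) (c :: rest) ([]:List Char) [] =
        (if sep.isPrefixOf (c :: rest) then PySem.Chars.splitOn.go sep f (List.drop sep.length (c :: rest)) [] [([]:List Char).reverse]
         else PySem.Chars.splitOn.go sep f rest (c :: ([]:List Char)) []) from rfl]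
      by_cases hp : sep.isPrefixOf (c :: rest)
      · simp only [hp, if_true]
        rw [pv_go_acc sep f _ [] [cur.reverse], pv_go_acc sep f _ [] [([]:List Char).reverse]]
        cases hgo : PySem.Chars.splitOn.go sep f (List.drop sep.length (c :: rest)) [] [] with
        | nil => simp
        | cons h tl => simp
      · simp only [hp]
        rw [ih rest (c :: cur), ih rest [c]]
        cases hgo : PySem.Chars.splitOn.go sep f rest [] [] with
        | nil => simp
        | cons h tl => simp

lemma pv_go_fuel (sep : List Char) (hsep : sep ≠ []) : ∀ (f1 f2 : Nat) (l cur : List Char)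
    (acc : List (List Char)), l.length < f1 → l.length < f2 →
    PySem.Chars.splitOn.go sep f1 l cur acc = PySem.Chars.splitOn.go sep f2 l cur acc := by
  intro f1
  induction f1 with
  | zero => intro f2 l cur acc h1; omega
  | succ f ih =>
    intro f2 l cur acc h1 h2
    cases f2 with
    | zero => omega
    | succ g =>
      cases l with
      | nil =>
        rw [show PySem.Chars.splitOn.go sep (f+1) [] cur acc = (cur.reverse :: acc).reverse from rfl,
            show PySem.Chars.splitOn.go sep (g+1) [] cur acc = (cur.reverse :: acc).reverse from rfl]
      | cons c rest =>
        rw [show PySem.Chars.splitOn.go sep (f+1) (c :: rest) cur acc =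
          (if sep.isPrefixOf (c :: rest) then PySem.Chars.splitOn.go sep f (List.drop sep.length (c :: rest)) [] (cur.reverse :: acc)
           else PySem.Chars.splitOn.go sep f rest (c :: cur) acc) from rfl,
          show PySem.Chars.splitOn.go sep (g+1) (c :: rest) cur acc =
          (if sep.isPrefixOf (c :: rest) then PySem.Chars.splitOn.go sep g (List.drop sep.length (c :: rest)) [] (cur.reverse :: acc)
           else PySem.Chars.splitOn.go sep g rest (c :: cur) acc) from rfl]
        have hsl : 1 ≤ sep.length := List.length_pos_of_ne_nil hsep
        by_cases hp : sep.isPrefixOf (c :: rest)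
        · simp only [hp, if_true]
          apply ih <;> · simp at h1 h2 ⊢; omega
        · simp only [hp]
          apply ih <;> simp at h1 h2 ⊢ <;> omega

lemma pv_splitOn_nil (sep : List Char) : PySem.Chars.splitOn [] sep = [[]] := rfl

lemma pv_splitOn_ne_nil (sep l : List Char) : PySem.Chars.splitOn l sep ≠ [] :=
  pv_go_ne_nil sep _ l [] []

lemma pv_splitOn_pos (sep : List Char) (hsep : sep ≠ []) (l : List Char) (hl : l ≠ [])
    (hpre : sep.isPrefixOf l = true) :
    PySem.Chars.splitOn l sep = [] :: PySem.Chars.splitOn (l.drop sep.length) sep := by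
  cases l with
  | nil => exact absurd rfl hl
  | cons c rest =>
    rw [PySem.Chars.splitOn]
    rw [show PySem.Chars.splitOn.go sep ((c :: rest).length + 1) (c :: rest) [] [] =
      (if sep.isPrefixOf (c :: rest) then PySem.Chars.splitOn.go sep (c :: rest).length (List.drop sep.length (c :: rest)) [] [[]]
       else PySem.Chars.splitOn.go sep (c :: rest).length rest [c] []) from rfl]
    simp only [hpre, if_true]
    rw [pv_go_acc, pv_go_fuel sep hsep (c :: rest).length ((List.drop sep.length (c :: rest)).length + 1) _ _ _ ?_ ?_]
    · rw [PySem.Chars.splitOn]; simp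
    · have hsl : 1 ≤ sep.length := List.length_pos_of_ne_nil hsep
      simp; omega
    · omega

lemma pv_splitOn_neg (sep : List Char) (hsep : sep ≠ []) (c : Char) (t : List Char)
    (hpre : sep.isPrefixOf (c :: t) = false) :
    PySem.Chars.splitOn (c :: t) sep =
      (PySem.Chars.splitOn t sep).modifyHead (c :: ·) := by
  rw [PySem.Chars.splitOn]
  rw [show PySem.Chars.splitOn.go sep ((c :: t).length + 1) (c :: t) [] [] =
    (if sep.isPrefixOf (c :: t) then PySem.Chars.splitOn.go sep (c :: t).length (List.drop sep.length (c :: t)) [] [[]]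
     else PySem.Chars.splitOn.go sep (c :: t).length t [c] []) from rfl]
  simp only [hpre, Bool.false_eq_true, if_false]
  rw [pv_go_cur, pv_go_fuel sep hsep (c :: t).length (t.length + 1) _ _ _ (by simp) (by omega)]
  rw [PySem.Chars.splitOn]
  rfl

-- the central characterisation: the first piece ends at find, the rest restarts after the separator
lemma pv_splitOn_find (sep : List Char) (hsep : sep ≠ []) : ∀ (n : Nat) (l : List Char), l.length ≤ n →
    PySem.Chars.splitOn l sep =
      (if PySem.Chars.find l sep = -1 then l else l.take (PySem.Chars.find l sep).toNat) ::
      (if PySem.Chars.find l sep = -1 then []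
       else PySem.Chars.splitOn (l.drop ((PySem.Chars.find l sep).toNat + sep.length)) sep) := by
  intro n
  induction n with
  | zero =>
    intro l hl
    have : l = [] := List.eq_nil_of_length_eq_zero (Nat.le_zero.mp hl)
    subst this
    rw [pv_splitOn_nil, pv_find_nil sep hsep]
    simp
  | succ m ih =>
    intro l hl
    cases l with
    | nil =>
      rw [pv_splitOn_nil, pv_find_nil sep hsep]; simp
    | cons c t =>
      by_cases hp : sep.isPrefixOf (c :: t)
      · have hf : PySem.Chars.find (c :: t) sep = 0 := by rw [pv_find_cons]; simp [hp]
        rw [pv_splitOn_pos sep hsep _ (by simp) hp, hf]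
        norm_num
      · have hf := pv_find_cons sep c t
        simp only [hp, Bool.false_eq_true, if_false] at hf
        rw [pv_splitOn_neg sep hsep c t (by simp [hp])]
        rw [ih t (by simpa using hl)]
        by_cases h0 : PySem.Chars.find t sep = -1
        · simp only [h0, if_true, hf]
          simp
        · have hnn : (0:Int) ≤ PySem.Chars.find t sep := by
            have := PySem.Chars.neg_one_le_find t sep; omega
          have hne : PySem.Chars.find t sep + 1 ≠ -1 := by omega
          simp only [h0, hf, if_false, hne, List.modifyHead_cons]
          have htn : (PySem.Chars.find t sep + 1).toNat = (PySem.Chars.find t sep).toNat + 1 := by omega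
          rw [htn]
          rw [List.take_succ_cons,
            show (PySem.Chars.find t sep).toNat + 1 + sep.length = ((PySem.Chars.find t sep).toNat + sep.length) + 1 by omega,
            List.drop_succ_cons]

lemma pv_join_splitOn (sep : List Char) (hsep : sep ≠ []) : ∀ (n : Nat) (l : List Char), l.length ≤ n →
    PySem.Chars.join sep (PySem.Chars.splitOn l sep) = l := by
  intro n
  induction n with
  | zero =>
    intro l hl
    have : l = [] := List.eq_nil_of_length_eq_zero (Nat.le_zero.mp hl)
    subst this
    rw [pv_splitOn_nil]
    simp [PySem.Chars.join, List.intercalate]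
  | succ m ih =>
    intro l hl
    cases l with
    | nil => rw [pv_splitOn_nil]; simp [PySem.Chars.join, List.intercalate]
    | cons c t =>
      by_cases hp : sep.isPrefixOf (c :: t)
      · rw [pv_splitOn_pos sep hsep _ (by simp) hp]
        have hsl : 1 ≤ sep.length := List.length_pos_of_ne_nil hsep
        obtain ⟨h2, tl, hsplit⟩ : ∃ h2 tl, PySem.Chars.splitOn (List.drop sep.length (c :: t)) sep = h2 :: tl := by
          cases hq : PySem.Chars.splitOn (List.drop sep.length (c :: t)) sep with
          | nil => exact absurd hq (pv_splitOn_ne_nil sep _)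
          | cons a b => exact ⟨a, b, rfl⟩
        rw [hsplit]
        rw [PySem.Chars.join_cons_cons]
        rw [← hsplit, ih _ (by rw [List.length_drop]; simp at hl ⊢; omega)]
        simp
        exact (List.prefix_iff_eq_append.mp (List.isPrefixOf_iff_prefix.mp hp))
      · rw [pv_splitOn_neg sep hsep c t (by simp [hp])]
        obtain ⟨h2, tl, hsplit⟩ : ∃ h2 tl, PySem.Chars.splitOn t sep = h2 :: tl := by
          cases hq : PySem.Chars.splitOn t sep with
          | nil => exact absurd hq (pv_splitOn_ne_nil sep _)
          | cons a b => exact ⟨a, b, rfl⟩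
        rw [hsplit, List.modifyHead_cons]
        have hj : ∀ x (xs : List (List Char)), PySem.Chars.join sep ((c :: x) :: xs) = c :: PySem.Chars.join sep (x :: xs) := by
          intro x xs
          cases xs with
          | nil => simp [PySem.Chars.join, List.intercalate]
          | cons y ys => rw [PySem.Chars.join_cons_cons, PySem.Chars.join_cons_cons]; simp
        rw [hj, ← hsplit, ih t (by simpa using hl)]

lemma pv_lower_eq_nil (x : List Char) : PySem.Chars.lower x = [] ↔ x = [] := by
  simp [PySem.Chars.lower]

lemma pv_block_eq (part : List Char) :
    (let lines := PySem.Chars.splitOn (PySem.Chars.strip part) ['\n']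
     let l0 := lines.headD []
     if PySem.Chars.lower (PySem.Chars.strip l0)
         ∈ [['r','e','d','c','o','d','e'], ['a','s','s','e','m','b','l','y'], ['a','s','m'], []] then
       PySem.Chars.join ['\n'] (if PySem.Chars.strip l0 ≠ [] then lines.drop 1 else lines)
     else PySem.Chars.strip part) =
    (let body := PySem.Chars.strip part
     let lines := PySem.Chars.splitOn body ['\n']
     if PySem.Chars.lower (PySem.Chars.strip (lines.headD []))
         ∈ [['r','e','d','c','o','d','e'], ['a','s','s','e','m','b','l','y'], ['a','s','m']] then
       PySem.Chars.join ['\n'] (lines.drop 1)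
     else body) := by
  simp only []
  set body := PySem.Chars.strip part with hbody
  set lines := PySem.Chars.splitOn body ['\n'] with hlines
  set l0 := lines.headD [] with hl0
  by_cases h0 : PySem.Chars.strip l0 = []
  · have hlow : PySem.Chars.lower (PySem.Chars.strip l0) = [] := (pv_lower_eq_nil _).mpr h0
    rw [hlow]
    simp only [h0]
    have : PySem.Chars.join ['\n'] lines = body :=
      pv_join_splitOn ['\n'] (by simp) body.length body le_rfl
    simp [this]
  · have hlow : PySem.Chars.lower (PySem.Chars.strip l0) ≠ [] := fun h => h0 ((pv_lower_eq_nil _).mp h)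
    by_cases hmem : PySem.Chars.lower (PySem.Chars.strip l0)
        ∈ [['r','e','d','c','o','d','e'], ['a','s','s','e','m','b','l','y'], ['a','s','m']]
    · have : PySem.Chars.lower (PySem.Chars.strip l0)
          ∈ [['r','e','d','c','o','d','e'], ['a','s','s','e','m','b','l','y'], ['a','s','m'], []] := by
        simp at hmem ⊢; tauto
      simp [this, hmem, h0]
    · have : PySem.Chars.lower (PySem.Chars.strip l0)
          ∉ [['r','e','d','c','o','d','e'], ['a','s','s','e','m','b','l','y'], ['a','s','m'], []] := by
        simp at hmem ⊢; tauto
      simp [this, hmem]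

-- A's fallback loop is B's filter
lemma pv_fallback_eq (s : List Char) :
    pvAFallback s =
      PySem.Chars.join ['\n']
        ((PySem.Chars.splitOn s ['\n']).filter
          (fun l => !PySem.Chars.startswith (PySem.Chars.strip l) ['*','*'])) := by
  unfold pvAFallback
  have hbody : (fun (acc : List (List Char)) (line : List Char) =>
      let stripped := PySem.Chars.strip line
      if PySem.Chars.startswith stripped ['#'] && !(PySem.Chars.startswith stripped ['#']) then acc
      else if PySem.Chars.startswith stripped ['*','*'] then acc
      else acc ++ [line]) =
      (fun acc x => if (!PySem.Chars.startswith (PySem.Chars.strip x) ['*','*']) = true then acc ++ [id x] else acc) := by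
    funext acc line
    simp only [Bool.and_not_self, id]
    by_cases h : PySem.Chars.startswith (PySem.Chars.strip line) ['*','*'] <;> simp [h]
  rw [hbody]
  simp only [PySem.List.foldl_append_if]
  simp

-- running A's enumerate loop: index 0 skips, index 1 returns
lemma pvALoop_zero (p : List Char) (tl : List (List Char)) : pvALoop (p :: tl) 0 = pvALoop tl 1 := by
  simp [pvALoop]

lemma pvALoop_one (p : List Char) (tl : List (List Char)) : pvALoop (p :: tl) 1 =
    some (let lines := PySem.Chars.splitOn (PySem.Chars.strip p) ['\n']
      let l0 := lines.headD []
      if PySem.Chars.lower (PySem.Chars.strip l0)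
          ∈ [['r','e','d','c','o','d','e'], ['a','s','s','e','m','b','l','y'], ['a','s','m'], []] then
        PySem.Chars.join ['\n'] (if PySem.Chars.strip l0 ≠ [] then lines.drop 1 else lines)
      else PySem.Chars.strip p) := by
  simp only [pvALoop]
  simp only [Nat.reduceMod, beq_self_eq_true, if_true, List.headD_eq_head?_getD]
  exact (apply_ite some _ _ _).symm

-- ===== the scan automaton vs find =====

lemma pv_scan_stop (s : List Char) : pvBScan s 3 = (s, 3) := by
  cases s <;> simp [pvBScan]

lemma pv_scan2_stop (s buf : List Char) : pvBScan2 s 3 buf = (buf, 3) := by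
  cases s <;> simp [pvBScan2]

lemma pv_find_add3_le (s : List Char) (h : PySem.Chars.find s ['`','`','`'] ≠ -1) :
    (PySem.Chars.find s ['`','`','`']).toNat + 3 ≤ s.length := by
  have h0 : 0 ≤ PySem.Chars.find s ['`','`','`'] := by
    have := PySem.Chars.neg_one_le_find s ['`','`','`']; omega
  have hp := (PySem.Chars.find_spec (s := s) (sub := ['`','`','`']) h0).1
  have hlen := hp.length_le
  simp [List.length_drop] at hlen
  omega

-- the run-counting state machine finds exactly the first occurrence of "```"
lemma pv_scan_spec : ∀ (n : Nat) (s : List Char), s.length ≤ n →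
    (if PySem.Chars.find s ['`','`','`'] = -1
     then (pvBScan s 0).1 = [] ∧ (pvBScan s 0).2 < 3
     else pvBScan s 0 = (s.drop ((PySem.Chars.find s ['`','`','`']).toNat + 3), 3)) := by
  intro n
  induction n with
  | zero =>
    intro s hl
    have hs : s = [] := List.eq_nil_of_length_eq_zero (Nat.le_zero.mp hl)
    subst hs
    rw [pv_find_nil _ (by simp)]
    simp [pvBScan]
  | succ m ih =>
    intro s hl
    cases s with
    | nil => rw [pv_find_nil _ (by simp)]; simp [pvBScan]
    | cons a t =>
      by_cases ha : a = '`'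
      · subst ha
        cases t with
        | nil =>
          have hf : PySem.Chars.find ['`'] ['`','`','`'] = -1 := by decide
          rw [hf]; simp [pvBScan]
        | cons b u =>
          by_cases hb : b = '`'
          · subst hb
            cases u with
            | nil =>
              have hf : PySem.Chars.find ['`','`'] ['`','`','`'] = -1 := by decide
              rw [hf]; simp [pvBScan]
            | cons cc v =>
              by_cases hc : cc = '`'
              · subst hc
                have hpre : List.isPrefixOf ['`','`','`'] ('`' :: '`' :: '`' :: v) = true := by
                  simp [List.isPrefixOf]
                have hf : PySem.Chars.find ('`' :: '`' :: '`' :: v) ['`','`','`'] = 0 := by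
                  rw [pv_find_cons]; simp [hpre]
                rw [hf]
                have hstep : pvBScan ('`' :: '`' :: '`' :: v) 0 = pvBScan v 3 := by
                  simp [pvBScan]
                simp only [show (0:Int) ≠ -1 by decide, if_false, hstep, pv_scan_stop]
                simp
              · -- "``c" ++ v with c ≠ '`'
                have hp1 : List.isPrefixOf ['`','`','`'] ('`' :: '`' :: cc :: v) = false := by
                  simp [List.isPrefixOf, Ne.symm hc]
                have hp2 : List.isPrefixOf ['`','`','`'] ('`' :: cc :: v) = false := by
                  simp [List.isPrefixOf, Ne.symm hc]
                have hp3 : List.isPrefixOf ['`','`','`'] (cc :: v) = false := by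
                  simp [List.isPrefixOf, Ne.symm hc]
                have hstep : pvBScan ('`' :: '`' :: cc :: v) 0 = pvBScan v 0 := by
                  simp [pvBScan, hc]
                have ihv := ih v (by simp at hl; omega)
                rw [pv_find_cons]
                simp only [hp1, Bool.false_eq_true, if_false]
                rw [pv_find_cons]
                simp only [hp2, Bool.false_eq_true, if_false]
                rw [pv_find_cons]
                simp only [hp3, Bool.false_eq_true, if_false]
                by_cases h0 : PySem.Chars.find v ['`','`','`'] = -1
                · simpa [h0, hstep] using ihv
                · have hnn : (0:Int) ≤ PySem.Chars.find v ['`','`','`'] := by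
                    have := PySem.Chars.neg_one_le_find v ['`','`','`']; omega
                  simp only [h0, if_false, show PySem.Chars.find v ['`','`','`'] + 1 ≠ -1 by omega,
                    show PySem.Chars.find v ['`','`','`'] + 1 + 1 ≠ -1 by omega,
                    show PySem.Chars.find v ['`','`','`'] + 1 + 1 + 1 ≠ -1 by omega, if_false, hstep]
                  simp only [h0, if_false] at ihv
                  rw [show (PySem.Chars.find v ['`','`','`'] + 1 + 1 + 1).toNat + 3
                      = (((PySem.Chars.find v ['`','`','`']).toNat + 3) + 1 + 1) + 1 by omega]
                  simp only [List.drop_succ_cons]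
                  exact ihv
          · -- "`b" ++ u with b ≠ '`'
            have hp1 : List.isPrefixOf ['`','`','`'] ('`' :: b :: u) = false := by
              simp [List.isPrefixOf, Ne.symm hb]
            have hp2 : List.isPrefixOf ['`','`','`'] (b :: u) = false := by
              simp [List.isPrefixOf, Ne.symm hb]
            have hstep : pvBScan ('`' :: b :: u) 0 = pvBScan u 0 := by
              simp [pvBScan, hb]
            have ihu := ih u (by simp at hl; omega)
            rw [pv_find_cons]
            simp only [hp1, Bool.false_eq_true, if_false]
            rw [pv_find_cons]
            simp only [hp2, Bool.false_eq_true, if_false]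
            by_cases h0 : PySem.Chars.find u ['`','`','`'] = -1
            · simpa [h0, hstep] using ihu
            · have hnn : (0:Int) ≤ PySem.Chars.find u ['`','`','`'] := by
                have := PySem.Chars.neg_one_le_find u ['`','`','`']; omega
              simp only [h0, if_false, show PySem.Chars.find u ['`','`','`'] + 1 ≠ -1 by omega,
                show PySem.Chars.find u ['`','`','`'] + 1 + 1 ≠ -1 by omega, if_false, hstep]
              simp only [h0, if_false] at ihu
              rw [show (PySem.Chars.find u ['`','`','`'] + 1 + 1).toNat + 3
                  = (((PySem.Chars.find u ['`','`','`']).toNat + 3) + 1) + 1 by omega]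
              simp only [List.drop_succ_cons]
              exact ihu
      · -- a ≠ '`'
        have hp1 : List.isPrefixOf ['`','`','`'] (a :: t) = false := by
          simp [List.isPrefixOf, Ne.symm ha]
        have hstep : pvBScan (a :: t) 0 = pvBScan t 0 := by
          simp [pvBScan, ha]
        have iht := ih t (by simp at hl; omega)
        rw [pv_find_cons]
        simp only [hp1, Bool.false_eq_true, if_false]
        by_cases h0 : PySem.Chars.find t ['`','`','`'] = -1
        · simpa [h0, hstep] using iht
        · have hnn : (0:Int) ≤ PySem.Chars.find t ['`','`','`'] := by
            have := PySem.Chars.neg_one_le_find t ['`','`','`']; omega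
          simp only [h0, if_false, show PySem.Chars.find t ['`','`','`'] + 1 ≠ -1 by omega, hstep]
          simp only [h0, if_false] at iht
          rw [show (PySem.Chars.find t ['`','`','`'] + 1).toNat + 3
              = ((PySem.Chars.find t ['`','`','`']).toNat + 3) + 1 by omega]
          simp only [List.drop_succ_cons]
          exact iht

lemma pv_scan2_spec : ∀ (n : Nat) (s : List Char), s.length ≤ n → ∀ (buf : List Char),
    (if PySem.Chars.find s ['`','`','`'] = -1
     then (pvBScan2 s 0 buf).1 = buf ++ s ∧ (pvBScan2 s 0 buf).2 < 3
     else pvBScan2 s 0 buf = (buf ++ s.take ((PySem.Chars.find s ['`','`','`']).toNat + 3), 3)) := by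
  intro n
  induction n with
  | zero =>
    intro s hl
    have hs : s = [] := List.eq_nil_of_length_eq_zero (Nat.le_zero.mp hl)
    subst hs
    intro buf
    rw [pv_find_nil _ (by simp)]
    simp [pvBScan2]
  | succ m ih =>
    intro s hl buf
    cases s with
    | nil => rw [pv_find_nil _ (by simp)]; simp [pvBScan2]
    | cons a t =>
      by_cases ha : a = '`'
      · subst ha
        cases t with
        | nil =>
          have hf : PySem.Chars.find ['`'] ['`','`','`'] = -1 := by decide
          rw [hf]; simp [pvBScan2]
        | cons b u =>
          by_cases hb : b = '`'
          · subst hb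
            cases u with
            | nil =>
              have hf : PySem.Chars.find ['`','`'] ['`','`','`'] = -1 := by decide
              rw [hf]; simp [pvBScan2]
            | cons cc v =>
              by_cases hc : cc = '`'
              · subst hc
                have hpre : List.isPrefixOf ['`','`','`'] ('`' :: '`' :: '`' :: v) = true := by
                  simp [List.isPrefixOf]
                have hf : PySem.Chars.find ('`' :: '`' :: '`' :: v) ['`','`','`'] = 0 := by
                  rw [pv_find_cons]; simp [hpre]
                rw [hf]
                have hstep : pvBScan2 ('`' :: '`' :: '`' :: v) 0 buf
                    = pvBScan2 v 3 (buf ++ ['`','`','`']) := by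
                  simp [pvBScan2]
                simp only [show (0:Int) ≠ -1 by decide, if_false, hstep, pv_scan2_stop]
                simp
              · -- "``c" ++ v with c ≠ '`'
                have hp1 : List.isPrefixOf ['`','`','`'] ('`' :: '`' :: cc :: v) = false := by
                  simp [List.isPrefixOf, Ne.symm hc]
                have hp2 : List.isPrefixOf ['`','`','`'] ('`' :: cc :: v) = false := by
                  simp [List.isPrefixOf, Ne.symm hc]
                have hp3 : List.isPrefixOf ['`','`','`'] (cc :: v) = false := by
                  simp [List.isPrefixOf, Ne.symm hc]
                have hstep : pvBScan2 ('`' :: '`' :: cc :: v) 0 buf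
                    = pvBScan2 v 0 (buf ++ ['`', '`', cc]) := by
                  simp [pvBScan2, hc]
                have ihv := ih v (by simp at hl; omega) (buf ++ ['`', '`', cc])
                rw [pv_find_cons]
                simp only [hp1, Bool.false_eq_true, if_false]
                rw [pv_find_cons]
                simp only [hp2, Bool.false_eq_true, if_false]
                rw [pv_find_cons]
                simp only [hp3, Bool.false_eq_true, if_false]
                by_cases h0 : PySem.Chars.find v ['`','`','`'] = -1
                · simp only [h0, if_true] at ihv ⊢
                  simp only [hstep]
                  simpa using ihv
                · have hnn : (0:Int) ≤ PySem.Chars.find v ['`','`','`'] := by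
                    have := PySem.Chars.neg_one_le_find v ['`','`','`']; omega
                  simp only [h0, if_false, show PySem.Chars.find v ['`','`','`'] + 1 ≠ -1 by omega,
                    show PySem.Chars.find v ['`','`','`'] + 1 + 1 ≠ -1 by omega,
                    show PySem.Chars.find v ['`','`','`'] + 1 + 1 + 1 ≠ -1 by omega, if_false, hstep]
                  simp only [h0, if_false] at ihv
                  rw [show (PySem.Chars.find v ['`','`','`'] + 1 + 1 + 1).toNat + 3
                      = (((PySem.Chars.find v ['`','`','`']).toNat + 3) + 1 + 1) + 1 by omega]
                  simp only [List.take_succ_cons]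
                  rw [ihv]
                  simp
          · -- "`b" ++ u with b ≠ '`'
            have hp1 : List.isPrefixOf ['`','`','`'] ('`' :: b :: u) = false := by
              simp [List.isPrefixOf, Ne.symm hb]
            have hp2 : List.isPrefixOf ['`','`','`'] (b :: u) = false := by
              simp [List.isPrefixOf, Ne.symm hb]
            have hstep : pvBScan2 ('`' :: b :: u) 0 buf = pvBScan2 u 0 (buf ++ ['`', b]) := by
              simp [pvBScan2, hb]
            have ihu := ih u (by simp at hl; omega) (buf ++ ['`', b])
            rw [pv_find_cons]
            simp only [hp1, Bool.false_eq_true, if_false]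
            rw [pv_find_cons]
            simp only [hp2, Bool.false_eq_true, if_false]
            by_cases h0 : PySem.Chars.find u ['`','`','`'] = -1
            · simp only [h0, if_true] at ihu ⊢
              simp only [hstep]
              simpa using ihu
            · have hnn : (0:Int) ≤ PySem.Chars.find u ['`','`','`'] := by
                have := PySem.Chars.neg_one_le_find u ['`','`','`']; omega
              simp only [h0, if_false, show PySem.Chars.find u ['`','`','`'] + 1 ≠ -1 by omega,
                show PySem.Chars.find u ['`','`','`'] + 1 + 1 ≠ -1 by omega, if_false, hstep]
              simp only [h0, if_false] at ihu
              rw [show (PySem.Chars.find u ['`','`','`'] + 1 + 1).toNat + 3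
                  = (((PySem.Chars.find u ['`','`','`']).toNat + 3) + 1) + 1 by omega]
              simp only [List.take_succ_cons]
              rw [ihu]
              simp
      · -- a ≠ '`'
        have hp1 : List.isPrefixOf ['`','`','`'] (a :: t) = false := by
          simp [List.isPrefixOf, Ne.symm ha]
        have hstep : pvBScan2 (a :: t) 0 buf = pvBScan2 t 0 (buf ++ [a]) := by
          simp [pvBScan2, ha]
        have iht := ih t (by simp at hl; omega) (buf ++ [a])
        rw [pv_find_cons]
        simp only [hp1, Bool.false_eq_true, if_false]
        by_cases h0 : PySem.Chars.find t ['`','`','`'] = -1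
        · simp only [h0, if_true] at iht ⊢
          simp only [hstep]
          simpa using iht
        · have hnn : (0:Int) ≤ PySem.Chars.find t ['`','`','`'] := by
            have := PySem.Chars.neg_one_le_find t ['`','`','`']; omega
          simp only [h0, if_false, show PySem.Chars.find t ['`','`','`'] + 1 ≠ -1 by omega, hstep]
          simp only [h0, if_false] at iht
          rw [show (PySem.Chars.find t ['`','`','`'] + 1).toNat + 3
              = ((PySem.Chars.find t ['`','`','`']).toNat + 3) + 1 by omega]
          simp only [List.take_succ_cons]
          rw [iht]
          simp

-- ===== VERDICT (by name: the statement is the Claim_ definition above) =====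
theorem extract_redcode_py_spec : Claim_equal_extract_redcode_py := by
  intro response _hdom
  unfold Spec_extract_redcode_py
  unfold extract_redcode_py extract_redcode_py_alt
  simp only [PySem.Chars.isIn]
  set s := response.toList with hs
  have hscan := pv_scan_spec s.length s le_rfl
  by_cases h : PySem.Chars.find s ['`','`','`'] = -1
  · rw [if_pos h] at hscan
    have hrun : ((pvBScan s 0).2 == 3) = false := by
      simpa using Nat.ne_of_lt hscan.2
    simp only [h, bne_self_eq_false, Bool.false_eq_true, if_false, hrun]
    rw [pv_fallback_eq]
  · have hbne : (PySem.Chars.find s ['`','`','`'] != -1) = true := by simp [h]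
    rw [if_neg h] at hscan
    simp only [hbne, if_true, hscan]
    -- A side: split s at the first ['`','`','`']
    have hsplit := pv_splitOn_find ['`','`','`'] (by simp) s.length s le_rfl
    simp only [if_neg h] at hsplit
    have hlen : (['`','`','`'] : List Char).length = 3 := by simp
    rw [hlen] at hsplit
    set rest := s.drop ((PySem.Chars.find s ['`','`','`']).toNat + 3) with hrest
    have hsplit2 := pv_splitOn_find ['`','`','`'] (by simp) rest.length rest le_rfl
    rw [hsplit, hsplit2, pvALoop_zero, pvALoop_one]
    -- B side: the second scan on rest
    have hscan2 := pv_scan2_spec rest.length rest le_rfl []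
    by_cases h2 : PySem.Chars.find rest ['`','`','`'] = -1
    · rw [if_pos h2] at hscan2; simp only [if_pos h2]
      have hrun2 : ((pvBScan2 rest 0 []).2 == 3) = false := by
        simpa using Nat.ne_of_lt hscan2.2
      simp only [hrun2, Bool.false_eq_true, if_false, hscan2.1, List.nil_append]
      rw [pv_block_eq rest]
      simp only [List.headD_eq_head?_getD, List.mem_cons, List.not_mem_nil, or_false]
      exact apply_ite String.ofList _ _ _
    · rw [if_neg h2] at hscan2; simp only [if_neg h2]
      simp only [hscan2, List.nil_append]
      have h3le := pv_find_add3_le rest h2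
      have hbody : (rest.take ((PySem.Chars.find rest ['`','`','`']).toNat + 3)).take
          ((rest.take ((PySem.Chars.find rest ['`','`','`']).toNat + 3)).length - 3)
          = rest.take (PySem.Chars.find rest ['`','`','`']).toNat := by
        rw [List.take_take]
        congr 1
        simp only [List.length_take]
        omega
      simp only [show ((3:Nat) == 3) = true from rfl, if_true, hbody]
      rw [pv_block_eq (rest.take (PySem.Chars.find rest ['`','`','`']).toNat)]
      simp only [List.headD_eq_head?_getD, List.mem_cons, List.not_mem_nil, or_false]
      exact apply_ite String.ofList _ _ _
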